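-- pv_equiv track=rewrite | github.com/nameses/ptdcp_practics | proj5/project5/ui.py | validate_and_trim_map
-- ===== SOURCE A (Python) =====
-- def validate_and_trim_map(matrix):
--     start_points = 0
--     finish_points = 0
--
--     rows = len(matrix)
--     cols = len(matrix[0]) if rows > 0 else 0
--
--     # Validate the map
--     for row in matrix:
--         start_points += row.count(2)
--         finish_points += row.count(3)
--
--     if start_points != 1:
--         raise ValueError(f"Invalid map: expected exactly one start point, found {start_points}.")
--
--     if finish_points != 1:
--         raise ValueError(f"Invalid map: expected exactly one finish point, found {finish_points}.")
--
--     # Find the bounding box of the non-empty area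
--     min_row, max_row = rows, -1
--     min_col, max_col = cols, -1
--
--     for r in range(rows):
--         for c in range(cols):
--             if matrix[r][c] != 0:
--                 if r < min_row:
--                     min_row = r
--                 if r > max_row:
--                     max_row = r
--                 if c < min_col:
--                     min_col = c
--                 if c > max_col:
--                     max_col = c
--
--     # Extract the trimmed matrix
--     trimmed_matrix = []
--     for r in range(min_row, max_row + 1):
--         trimmed_matrix.append(matrix[r][min_col:max_col + 1])
--
--     return trimmed_matrix
-- ===== SOURCE B (Python) =====
-- def validate_and_trim_map(matrix):
--     cells = [x for row in matrix for x in row]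
--     start_points = cells.count(2)
--     finish_points = cells.count(3)
--
--     if start_points != 1:
--         raise ValueError(f"Invalid map: expected exactly one start point, found {start_points}.")
--
--     if finish_points != 1:
--         raise ValueError(f"Invalid map: expected exactly one finish point, found {finish_points}.")
--
--     cols = len(matrix[0]) if matrix else 0
--     grid = [row[:cols] for row in matrix]
--
--     # Trim all-zero border rows from both ends, then cut every kept row to the
--     # column span [left:right] spanned by the occupied rows.
--     core = _drop_empty(grid)
--     core = _drop_empty(core[::-1])[::-1]
--     if not core:
--         return []
--
--     occupied = [row for row in core if any(row)]
--     left = min(_first_nonzero(row) for row in occupied)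
--     right = max(len(row) - _first_nonzero(row[::-1]) for row in occupied)
--     return [row[left:right] for row in core]
--
--
-- def _drop_empty(rows):
--     if rows and not any(rows[0]):
--         return _drop_empty(rows[1:])
--     return rows
--
--
-- def _first_nonzero(row):
--     return next(i for i, x in enumerate(row) if x)
-- ===== Notes on version B (the rewrite author's own statement) =====
-- stated objective: alternative
-- what changed: Replaces A's nested index scan maintaining four running extremes with a border-trimming algorithm: B drops all-zero rows from both ends of the (width-clamped) grid, then computes the column span as min/max of each occupied row's first/last nonzero index and slices the kept rows; validation counts over the flattened cell list instead of an accumulating loop.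
import Mathlib
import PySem

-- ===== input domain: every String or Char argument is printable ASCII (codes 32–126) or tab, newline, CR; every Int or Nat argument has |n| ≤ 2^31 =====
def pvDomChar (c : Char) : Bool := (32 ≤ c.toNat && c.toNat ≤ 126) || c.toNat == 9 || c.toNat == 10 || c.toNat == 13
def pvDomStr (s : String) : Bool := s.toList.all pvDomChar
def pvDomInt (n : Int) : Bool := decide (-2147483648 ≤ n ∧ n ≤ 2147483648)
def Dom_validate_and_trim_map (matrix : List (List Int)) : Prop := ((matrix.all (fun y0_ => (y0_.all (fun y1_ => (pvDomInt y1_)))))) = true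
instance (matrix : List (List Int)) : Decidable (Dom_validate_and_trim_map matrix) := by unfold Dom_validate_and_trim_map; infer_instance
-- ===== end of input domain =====

-- B replaces A's rectangular (r,c) scan with four running extremes by a border-trimming
-- decomposition: drop all-zero rows from both ends, then cut every kept row to the column
-- span [min first-nonzero, max last-nonzero] of the occupied rows; same asymptotic cost.


-- ===== PORT A =====
def validate_and_trim_map (matrix : List (List Int)) : List (List Int) :=
  let start_points : Int := matrix.foldl (fun acc row => acc + (PySem.List.count row 2 : Int)) 0
  let finish_points : Int := matrix.foldl (fun acc row => acc + (PySem.List.count row 3 : Int)) 0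
  let rows : Int := matrix.length
  let cols : Int := if rows > 0 then ((PySem.List.pyGetD matrix 0 []).length : Int) else 0
  if start_points ≠ 1 then [] else          -- Python raises ValueError here; outside Pre_
  if finish_points ≠ 1 then [] else         -- Python raises ValueError here; outside Pre_
  let st :=
    (PySem.List.pyRange 0 rows 1).foldl (fun s r =>
      (PySem.List.pyRange 0 cols 1).foldl (fun s c =>
        if PySem.List.pyGetD (PySem.List.pyGetD matrix r []) c 0 ≠ 0 then
          (if r < s.1 then r else s.1,
           if r > s.2.1 then r else s.2.1,
           if c < s.2.2.1 then c else s.2.2.1,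
           if c > s.2.2.2 then c else s.2.2.2)
        else s) s)
      ((rows : Int), (-1 : Int), (cols : Int), (-1 : Int))
  (PySem.List.pyRange st.1 (st.2.1 + 1) 1).map (fun r =>
    PySem.List.slice (PySem.List.pyGetD matrix r []) (some st.2.2.1) (some (st.2.2.2 + 1)))

-- ===== PORT B =====
-- Python's truthiness test 'any(row)' on a row of ints
def pvAny (row : List Int) : Bool := row.any (fun x => decide (x ≠ 0))

-- _drop_empty(rows): drop leading all-zero rows
def pvDropEmpty : List (List Int) → List (List Int)
  | [] => []
  | r :: t => if !pvAny r then pvDropEmpty t else r :: t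

-- _first_nonzero(row) = next(i for i, x in enumerate(row) if x); only called on
-- occupied rows, so the StopIteration branch (all-zero row) is unreachable in B
def pvFirstNZ : List Int → Int
  | [] => 0
  | x :: t => if x ≠ 0 then 0 else 1 + pvFirstNZ t

def validate_and_trim_map_alt (matrix : List (List Int)) : List (List Int) :=
  let cells : List Int := matrix.flatMap (fun row => row)
  let start_points : Int := (PySem.List.count cells 2 : Int)
  let finish_points : Int := (PySem.List.count cells 3 : Int)
  if start_points ≠ 1 then [] else          -- Python raises ValueError here; outside Pre_
  if finish_points ≠ 1 then [] else         -- Python raises ValueError here; outside Pre_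
  let cols : Int := if matrix ≠ [] then ((PySem.List.pyGetD matrix 0 []).length : Int) else 0
  let grid : List (List Int) := matrix.map (fun row => PySem.List.slice row none (some cols))
  let core := (pvDropEmpty ((pvDropEmpty grid).reverse)).reverse
  if core = [] then [] else
  let occupied := core.filter (fun row => pvAny row)
  let left : Int := (PySem.List.min? (occupied.map (fun row => pvFirstNZ row)) (fun y => y)).getD 0
  let right : Int := (PySem.List.max? (occupied.map (fun row => (row.length : Int) - pvFirstNZ row.reverse)) (fun y => y)).getD 0
  core.map (fun row => PySem.List.slice row (some left) (some right))

-- ===== PRECONDITION & SPEC =====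
-- Pre_ excludes exactly the inputs where Python A raises: a start/finish count other
-- than one (ValueError) and ragged matrices with a row shorter than row 0 (IndexError).
def Pre_validate_and_trim_map (matrix : List (List Int)) : Prop :=
  (∀ row ∈ matrix, (matrix.headD []).length ≤ row.length) ∧
  (matrix.map (fun row => (PySem.List.count row 2 : Int))).sum = 1 ∧
  (matrix.map (fun row => (PySem.List.count row 3 : Int))).sum = 1
instance (matrix : List (List Int)) : Decidable (Pre_validate_and_trim_map matrix) := by
  unfold Pre_validate_and_trim_map; infer_instance

def pvWitness_validate_and_trim_map : List (List Int) := [[0, 0, 0], [0, 2, 3], [0, 0, 0]]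


def Spec_validate_and_trim_map (matrix : List (List Int)) (out : List (List Int)) : Prop := out = validate_and_trim_map_alt matrix
instance (matrix : List (List Int)) (out : List (List Int)) : Decidable (Spec_validate_and_trim_map matrix out) := by unfold Spec_validate_and_trim_map; infer_instance

-- ===== CLAIM (what is proved, stated in full; the proofs are below) =====
def Claim_equal_validate_and_trim_map : Prop := ∀ (matrix : List (List Int)), Dom_validate_and_trim_map matrix → Pre_validate_and_trim_map matrix → Spec_validate_and_trim_map matrix (validate_and_trim_map matrix)

-- ===== LEMMAS AND PROOFS =====

-- A's running-extreme updates are min/max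
theorem pv_if_lt_eq_min (m x : Int) : (if x < m then x else m) = min m x := by
  rw [min_def]; split <;> split <;> omega

theorem pv_if_gt_eq_max (m x : Int) : (if x > m then x else m) = max m x := by
  rw [max_def]; split <;> split <;> omega

-- the coordinate list of nonzero cells, scanned in A's (row, col) order
def pvNZ (matrix : List (List Int)) (rows cols : Int) : List (Int × Int) :=
  (PySem.List.pyRange 0 rows 1).flatMap (fun r =>
    ((PySem.List.pyRange 0 cols 1).filter (fun c =>
        decide (PySem.List.pyGetD (PySem.List.pyGetD matrix r []) c 0 ≠ 0))).map (fun c => (r, c)))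

-- nested guarded loop over an index rectangle = single fold over the coordinate list
theorem pv_flat_if {S : Type} (l : List Int) (inner : Int → List Int)
    (q : Int → Int → Prop) [∀ r c, Decidable (q r c)] (upd : S → Int × Int → S) (init : S) :
    l.foldl (fun s r => (inner r).foldl (fun s c => if q r c then upd s (r, c) else s) s) init
      = (l.flatMap (fun r =>
          ((inner r).filter (fun c => decide (q r c))).map (fun c => (r, c)))).foldl upd init := by
  induction l generalizing init with
  | nil => rfl
  | cons r t ih =>
      simp only [List.foldl_cons, List.flatMap_cons, List.foldl_append]
      rw [ih]
      congr 1
      rw [List.foldl_map]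
      exact PySem.List.foldl_ite_eq_foldl_filter (q r) (fun s c => upd s (r, c)) _ _

-- a running min of a projection, nonempty list, large initial value = Python min()
theorem pv_minproj {α : Type} (nz : List α) (f : α → Int) (init : Int)
    (h : ∀ p ∈ nz, f p ≤ init) (hne : nz ≠ []) :
    nz.foldl (fun m p => if f p < m then f p else m) init
      = (PySem.List.min? (nz.map f) (fun y => y)).getD 0 := by
  cases nz with
  | nil => exact absurd rfl hne
  | cons p t =>
      have hfun : (fun (m : Int) (x : α) => if f x < m then f x else m)
          = fun m x => min m (f x) := by
        funext m x; exact pv_if_lt_eq_min m (f x)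
      rw [List.map_cons, PySem.List.min?_id_cons, Option.getD_some, hfun,
        List.foldl_cons, min_eq_right (h p (by simp)), List.foldl_map]

theorem pv_maxproj {α : Type} (nz : List α) (f : α → Int) (init : Int)
    (h : ∀ p ∈ nz, init ≤ f p) (hne : nz ≠ []) :
    nz.foldl (fun m p => if f p > m then f p else m) init
      = (PySem.List.max? (nz.map f) (fun y => y)).getD 0 := by
  cases nz with
  | nil => exact absurd rfl hne
  | cons p t =>
      have hfun : (fun (m : Int) (x : α) => if f x > m then f x else m)
          = fun m x => max m (f x) := by
        funext m x; exact pv_if_gt_eq_max m (f x)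
      rw [List.map_cons, PySem.List.max?_id_cons, Option.getD_some, hfun,
        List.foldl_cons, max_eq_right (h p (by simp)), List.foldl_map]

-- coordinates collected in pvNZ lie in the index rectangle
theorem pv_nz_mem (matrix : List (List Int)) (rows cols : Int) :
    ∀ p ∈ pvNZ matrix rows cols, (0 ≤ p.1 ∧ p.1 < rows) ∧ 0 ≤ p.2 ∧ p.2 < cols := by
  intro p hp
  simp only [pvNZ, List.mem_flatMap, List.mem_map, List.mem_filter,
    PySem.List.mem_pyRange_one] at hp
  obtain ⟨r, hr, c, ⟨hc, _⟩, rfl⟩ := hp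
  exact ⟨hr, hc⟩

theorem pv_pyRange_nil (a b : Int) (h : b ≤ a) : PySem.List.pyRange a b 1 = [] := by
  rw [List.eq_nil_iff_forall_not_mem]
  intro x hx
  rw [PySem.List.mem_pyRange_one] at hx
  omega

-- A's four-accumulator scan, expressed through the coordinate list
theorem pv_state (matrix : List (List Int)) (rows cols : Int) :
    (PySem.List.pyRange 0 rows 1).foldl (fun s r =>
        (PySem.List.pyRange 0 cols 1).foldl (fun s c =>
          if PySem.List.pyGetD (PySem.List.pyGetD matrix r []) c 0 ≠ 0 then
            (if r < s.1 then r else s.1,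
             if r > s.2.1 then r else s.2.1,
             if c < s.2.2.1 then c else s.2.2.1,
             if c > s.2.2.2 then c else s.2.2.2)
          else s) s)
      ((rows : Int), (-1 : Int), (cols : Int), (-1 : Int))
    = (if pvNZ matrix rows cols = [] then ((rows : Int), (-1 : Int), (cols : Int), (-1 : Int))
       else ((PySem.List.min? ((pvNZ matrix rows cols).map Prod.fst) (fun y => y)).getD 0,
             (PySem.List.max? ((pvNZ matrix rows cols).map Prod.fst) (fun y => y)).getD 0,
             (PySem.List.min? ((pvNZ matrix rows cols).map Prod.snd) (fun y => y)).getD 0,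
             (PySem.List.max? ((pvNZ matrix rows cols).map Prod.snd) (fun y => y)).getD 0)) := by
  have h1 := pv_flat_if (S := Int × Int × Int × Int)
    (PySem.List.pyRange 0 rows 1) (fun _ => PySem.List.pyRange 0 cols 1)
    (fun r c => PySem.List.pyGetD (PySem.List.pyGetD matrix r []) c 0 ≠ 0)
    (fun s p => (if p.1 < s.1 then p.1 else s.1,
                 if p.1 > s.2.1 then p.1 else s.2.1,
                 if p.2 < s.2.2.1 then p.2 else s.2.2.1,
                 if p.2 > s.2.2.2 then p.2 else s.2.2.2))
    ((rows : Int), (-1 : Int), (cols : Int), (-1 : Int))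
  refine h1.trans ?_
  clear h1
  have hmem := pv_nz_mem matrix rows cols
  simp only [pvNZ] at hmem ⊢
  set nz := (PySem.List.pyRange 0 rows 1).flatMap (fun r =>
    ((PySem.List.pyRange 0 cols 1).filter (fun c =>
        decide (PySem.List.pyGetD (PySem.List.pyGetD matrix r []) c 0 ≠ 0))).map (fun c => (r, c))) with hnzdef
  by_cases hnz : nz = []
  · rw [if_pos hnz, hnz]; rfl
  · rw [if_neg hnz]
    rw [PySem.List.foldl_prod_mk
        (f := fun m (p : Int × Int) => if p.1 < m then p.1 else m)
        (g := fun (s : Int × Int × Int) (p : Int × Int) =>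
          (if p.1 > s.1 then p.1 else s.1,
           if p.2 < s.2.1 then p.2 else s.2.1,
           if p.2 > s.2.2 then p.2 else s.2.2)),
      PySem.List.foldl_prod_mk
        (f := fun m (p : Int × Int) => if p.1 > m then p.1 else m)
        (g := fun (s : Int × Int) (p : Int × Int) =>
          (if p.2 < s.1 then p.2 else s.1,
           if p.2 > s.2 then p.2 else s.2)),
      PySem.List.foldl_prod_mk
        (f := fun m (p : Int × Int) => if p.2 < m then p.2 else m)
        (g := fun (m : Int) (p : Int × Int) => if p.2 > m then p.2 else m)]
    refine Prod.ext ?_ (Prod.ext ?_ (Prod.ext ?_ ?_))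
    · exact pv_minproj nz Prod.fst rows (fun p hp => le_of_lt (hmem p hp).1.2) hnz
    · exact pv_maxproj nz Prod.fst (-1) (fun p hp => by have := (hmem p hp).1.1; omega) hnz
    · exact pv_minproj nz Prod.snd cols (fun p hp => le_of_lt (hmem p hp).2.2) hnz
    · exact pv_maxproj nz Prod.snd (-1) (fun p hp => by have := (hmem p hp).2.1; omega) hnz

-- ===== B-side structure lemmas =====

-- Nat version of B's first-nonzero index
def pvFirstNZN : List Int → Nat
  | [] => 0
  | x :: t => if x ≠ 0 then 0 else pvFirstNZN t + 1

theorem pvFirstNZ_eq_natCast (row : List Int) : pvFirstNZ row = (pvFirstNZN row : Int) := by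
  induction row with
  | nil => rfl
  | cons x t ih => simp only [pvFirstNZ, pvFirstNZN]; split <;> simp [ih]; omega

theorem pvAny_cons (x : Int) (t : List Int) :
    pvAny (x :: t) = (decide (x ≠ 0) || pvAny t) := by
  simp [pvAny]

theorem pvFirstNZN_lt (row : List Int) (h : pvAny row = true) : pvFirstNZN row < row.length := by
  induction row with
  | nil => simp [pvAny] at h
  | cons x t ih =>
      rw [pvAny_cons] at h
      by_cases hx : x = 0
      · rw [hx] at h
        have h' : pvAny t = true := by simpa using h
        have := ih h'
        simp [pvFirstNZN, hx]
        omega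
      · simp [pvFirstNZN, hx]

theorem pvFirstNZN_get (row : List Int) (h : pvAny row = true) :
    row.getD (pvFirstNZN row) 0 ≠ 0 := by
  induction row with
  | nil => simp [pvAny] at h
  | cons x t ih =>
      rw [pvAny_cons] at h
      by_cases hx : x = 0
      · rw [hx] at h
        have h' : pvAny t = true := by simpa using h
        simpa [pvFirstNZN, hx] using ih h'
      · simp [pvFirstNZN, hx]

theorem pvFirstNZN_min (row : List Int) : ∀ j < pvFirstNZN row, row.getD j 0 = 0 := by
  induction row with
  | nil => intro j hj; simp [pvFirstNZN] at hj
  | cons x t ih =>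
      intro j hj
      simp only [pvFirstNZN] at hj
      by_cases hx : x = 0
      · cases j with
        | zero => simpa using hx
        | succ k =>
            simp only [hx] at hj
            simp only [List.getD_cons_succ]
            exact ih k (by simpa using hj)
      · simp [hx] at hj

-- min()/max() with no key, pinned by a witness that is minimal/maximal
theorem pv_min_eq (l : List Int) (m : Int) (hm : m ∈ l) (hmin : ∀ x ∈ l, m ≤ x) :
    (PySem.List.min? l (fun y => y)).getD 0 = m := by
  cases h : PySem.List.min? l (fun y => y) with
  | none =>
      rw [PySem.List.min?_eq_none_iff] at h
      subst h; cases hm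
  | some v =>
      have hv := PySem.List.min?_mem h
      have hle := PySem.List.min?_isMin h
      exact le_antisymm (by simpa using hle m hm) (hmin v hv) ▸ rfl

theorem pv_max_eq (l : List Int) (m : Int) (hm : m ∈ l) (hmax : ∀ x ∈ l, x ≤ m) :
    (PySem.List.max? l (fun y => y)).getD 0 = m := by
  cases h : PySem.List.max? l (fun y => y) with
  | none =>
      rw [PySem.List.max?_eq_none_iff] at h
      subst h; cases hm
  | some v =>
      have hv := PySem.List.max?_mem h
      have hge := PySem.List.max?_isMax h
      exact le_antisymm (hmax v hv) (by simpa using hge m hm) ▸ rfl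

theorem pvDropEmpty_eq_dropWhile (l : List (List Int)) :
    pvDropEmpty l = l.dropWhile (fun r => !pvAny r) := by
  induction l with
  | nil => rfl
  | cons r t ih => simp only [pvDropEmpty, List.dropWhile_cons]; split_ifs <;> simp_all

theorem pv_dropWhile_eq_drop (l : List (List Int)) (p : List Int → Bool) :
    l.dropWhile p = l.drop (l.takeWhile p).length := by
  induction l with
  | nil => rfl
  | cons r t ih =>
      simp only [List.dropWhile_cons, List.takeWhile_cons]
      split <;> simp_all

-- nonzero-cell membership in Nat form
theorem pv_mem_nz_iff (matrix : List (List Int)) (n c : Nat) (p : Int × Int) :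
    p ∈ pvNZ matrix (n : Int) (c : Int) ↔
      ∃ rN cN : Nat, rN < n ∧ cN < c ∧ p = ((rN : Int), (cN : Int)) ∧
        (matrix.getD rN []).getD cN 0 ≠ 0 := by
  simp only [pvNZ, List.mem_flatMap, List.mem_map, List.mem_filter,
    PySem.List.mem_pyRange_one, decide_eq_true_eq]
  constructor
  · rintro ⟨r, ⟨hr0, hrn⟩, cI, ⟨⟨hc0, hcn⟩, hcell⟩, rfl⟩
    refine ⟨r.toNat, cI.toNat, by omega, by omega,
      by simp [Int.toNat_of_nonneg hr0, Int.toNat_of_nonneg hc0], ?_⟩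
    rw [show r = ((r.toNat : Nat) : Int) from (Int.toNat_of_nonneg hr0).symm,
      show cI = ((cI.toNat : Nat) : Int) from (Int.toNat_of_nonneg hc0).symm,
      PySem.List.pyGetD_natCast, PySem.List.pyGetD_natCast] at hcell
    exact hcell
  · rintro ⟨rN, cN, hrN, hcN, rfl, hcell⟩
    exact ⟨(rN : Int), ⟨by positivity, by exact_mod_cast hrN⟩, (cN : Int),
      ⟨⟨by positivity, by exact_mod_cast hcN⟩,
        by rw [PySem.List.pyGetD_natCast, PySem.List.pyGetD_natCast]; exact hcell⟩, rfl⟩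

-- getD facts
theorem pv_getD_take (l : List Int) (n j : Nat) (d : Int) (h : j < n) :
    (l.take n).getD j d = l.getD j d := by
  simp [List.getD_eq_getElem?_getD, h]

theorem pv_getD_reverse (l : List Int) (j : Nat) (h : j < l.length) :
    l.reverse.getD j 0 = l.getD (l.length - 1 - j) 0 := by
  rw [List.getD_eq_getElem _ _ (by simpa using h), List.getD_eq_getElem _ _ (by omega),
    List.getElem_reverse]

theorem pv_getD_zero_eq_headD (l : List (List Int)) : l.getD 0 [] = l.headD [] := by
  cases l <;> simp

-- 'any' as an indexed existence
theorem pvAny_iff_exists (row : List Int) :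
    pvAny row = true ↔ ∃ j < row.length, row.getD j 0 ≠ 0 := by
  simp only [pvAny, List.any_eq_true, decide_eq_true_eq]
  constructor
  · rintro ⟨x, hx, hx0⟩
    obtain ⟨j, hj, rfl⟩ := List.mem_iff_getElem.mp hx
    exact ⟨j, hj, by rwa [List.getD_eq_getElem _ _ hj]⟩
  · rintro ⟨j, hj, hj0⟩
    exact ⟨row[j], List.getElem_mem hj, by rwa [List.getD_eq_getElem _ _ hj] at hj0⟩

-- last-nonzero index (via the reversed row)
def pvLastN (row : List Int) : Nat := row.length - 1 - pvFirstNZN row.reverse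

theorem pvAny_reverse (row : List Int) : pvAny row.reverse = pvAny row := by
  simp [pvAny]

theorem pvFirstNZN_rev_lt (row : List Int) (h : pvAny row = true) :
    pvFirstNZN row.reverse < row.length := by
  have := pvFirstNZN_lt row.reverse (by rwa [pvAny_reverse])
  simpa using this

theorem pvLastN_lt (row : List Int) (h : pvAny row = true) : pvLastN row < row.length := by
  have := pvFirstNZN_rev_lt row h
  unfold pvLastN; omega

theorem pvLastN_get (row : List Int) (h : pvAny row = true) :
    row.getD (pvLastN row) 0 ≠ 0 := by
  have hf := pvFirstNZN_rev_lt row h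
  have := pvFirstNZN_get row.reverse (by rwa [pvAny_reverse])
  rw [pv_getD_reverse row _ hf] at this
  unfold pvLastN
  exact this

theorem pvLastN_max (row : List Int) (h : pvAny row = true) :
    ∀ j, pvLastN row < j → row.getD j 0 = 0 := by
  intro j hj
  have hf := pvFirstNZN_rev_lt row h
  by_cases hjl : j < row.length
  · have := pvFirstNZN_min row.reverse (row.length - 1 - j) (by unfold pvLastN at hj; omega)
    rw [pv_getD_reverse row (row.length - 1 - j) (by omega)] at this
    simpa [show row.length - 1 - (row.length - 1 - j) = j from by omega] using this
  · exact List.getD_eq_default row 0 (by omega)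

-- count over a flattened matrix = summed per-row counts (as ints)
theorem pv_count_flatten_int (l : List (List Int)) (v : Int) :
    ((l.flatten.count v : Nat) : Int) = (l.map (fun r => (r.count v : Int))).sum := by
  induction l with
  | nil => simp
  | cons r t ih => simp only [List.flatten_cons, List.count_append, List.map_cons,
      List.sum_cons, ← ih]; push_cast; ring

-- generalized getD facts used on lists of rows
theorem pv_getD_reverse' {α : Type} (l : List α) (j : Nat) (d : α) (h : j < l.length) :
    l.reverse.getD j d = l.getD (l.length - 1 - j) d := by
  rw [List.getD_eq_getElem _ _ (by simpa using h), List.getD_eq_getElem _ _ (by omega),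
    List.getElem_reverse]

-- proof-side views of B's trimming pipeline
def pvCols (matrix : List (List Int)) : Nat := (matrix.headD []).length
def pvGrid (matrix : List (List Int)) : List (List Int) :=
  matrix.map (fun row => row.take (pvCols matrix))

theorem pv_grid_length (matrix : List (List Int)) :
    (pvGrid matrix).length = matrix.length := by simp [pvGrid]

theorem pv_grid_getD (matrix : List (List Int)) (rN : Nat) (h : rN < matrix.length) :
    (pvGrid matrix).getD rN [] = (matrix.getD rN []).take (pvCols matrix) := by
  rw [List.getD_eq_getElem _ _ (by simpa [pvGrid] using h), List.getD_eq_getElem _ _ h]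
  simp [pvGrid]

-- first occupied index of a row list = length of its empty-row prefix
theorem pv_trim_head (l : List (List Int)) (hocc : ∃ row ∈ l, pvAny row = true) :
    (l.takeWhile (fun r => !pvAny r)).length < l.length ∧
    pvAny (l.getD (l.takeWhile (fun r => !pvAny r)).length []) = true ∧
    ∀ i < (l.takeWhile (fun r => !pvAny r)).length, pvAny (l.getD i []) = false := by
  set p : List Int → Bool := fun r => !pvAny r with hp
  set a := (l.takeWhile p).length with ha
  have hdw : l.dropWhile p ≠ [] := by
    intro hnil
    have := List.takeWhile_append_dropWhile (p := p) (l := l)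
    rw [hnil, List.append_nil] at this
    obtain ⟨row, hrow, hany⟩ := hocc
    rw [← this] at hrow
    have := List.mem_takeWhile_imp hrow
    simp [hp, hany] at this
  have hdrop : l.dropWhile p = l.drop a := pv_dropWhile_eq_drop l p
  have halt : a < l.length := by
    by_contra hge
    rw [hdrop, List.drop_eq_nil_iff.mpr (by omega)] at hdw
    exact hdw rfl
  refine ⟨halt, ?_, ?_⟩
  · have hhead := List.head_dropWhile_not p hdw
    simp only [hdrop] at hhead
    rw [List.head_drop] at hhead
    simp only [hp, Bool.not_eq_false'] at hhead
    rw [List.getD_eq_getElem _ _ halt]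
    simpa using hhead
  · intro i hi
    have hpre := List.takeWhile_prefix (l := l) p
    have hi' : i < l.length := by omega
    have hmem : l.getD i [] ∈ l.takeWhile p := by
      have htk : l.takeWhile p = l.take a := by
        rw [List.prefix_iff_eq_take.mp hpre, ← ha]
      rw [List.getD_eq_getElem _ _ hi', htk]
      have hgt : (l.take a)[i]'(by simp [List.length_take]; omega) = l[i]'hi' :=
        List.getElem_take
      rw [← hgt]
      exact List.getElem_mem _
    have := List.mem_takeWhile_imp hmem
    simpa [hp] using this

def pvTop (matrix : List (List Int)) : Nat :=
  ((pvGrid matrix).takeWhile (fun r => !pvAny r)).length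
def pvBot (matrix : List (List Int)) : Nat :=
  ((pvGrid matrix).reverse.takeWhile (fun r => !pvAny r)).length

-- top/bottom occupied rows of the grid
theorem pv_top_facts (matrix : List (List Int))
    (hocc : ∃ row ∈ pvGrid matrix, pvAny row = true) :
    pvTop matrix < (pvGrid matrix).length ∧
    pvAny ((pvGrid matrix).getD (pvTop matrix) []) = true ∧
    ∀ i < pvTop matrix, pvAny ((pvGrid matrix).getD i []) = false :=
  pv_trim_head (pvGrid matrix) hocc

theorem pv_bot_facts (matrix : List (List Int))
    (hocc : ∃ row ∈ pvGrid matrix, pvAny row = true) :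
    pvBot matrix < (pvGrid matrix).length ∧
    pvAny ((pvGrid matrix).getD ((pvGrid matrix).length - 1 - pvBot matrix) []) = true ∧
    ∀ i, (pvGrid matrix).length - 1 - pvBot matrix < i → i < (pvGrid matrix).length →
      pvAny ((pvGrid matrix).getD i []) = false := by
  have hocc' : ∃ row ∈ (pvGrid matrix).reverse, pvAny row = true := by
    obtain ⟨row, hrow, hany⟩ := hocc
    exact ⟨row, List.mem_reverse.mpr hrow, hany⟩
  obtain ⟨h1, h2, h3⟩ := pv_trim_head (pvGrid matrix).reverse hocc'
  have hBdef : ((pvGrid matrix).reverse.takeWhile (fun r => !pvAny r)).length = pvBot matrix := rfl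
  rw [List.length_reverse] at h1
  rw [hBdef] at h2 h3
  refine ⟨h1, ?_, ?_⟩
  · rwa [pv_getD_reverse' _ _ _ (by simpa using h1)] at h2
  · intro i hgt hlt
    have := h3 ((pvGrid matrix).length - 1 - i) (by omega)
    rwa [pv_getD_reverse' _ _ _ (by simpa using (by omega : (pvGrid matrix).length - 1 - i < (pvGrid matrix).length)),
      show (pvGrid matrix).length - 1 - ((pvGrid matrix).length - 1 - i) = i from by omega] at this

theorem pv_top_le_bot (matrix : List (List Int))
    (hocc : ∃ row ∈ pvGrid matrix, pvAny row = true) :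
    pvTop matrix ≤ (pvGrid matrix).length - 1 - pvBot matrix := by
  obtain ⟨-, -, htop⟩ := pv_top_facts matrix hocc
  obtain ⟨hb1, hbot, -⟩ := pv_bot_facts matrix hocc
  by_contra hlt
  have := htop ((pvGrid matrix).length - 1 - pvBot matrix) (by omega)
  rw [this] at hbot
  exact absurd hbot (by simp)

-- B's trimming pipeline lands exactly on rows pvTop .. len-1-pvBot of the grid
theorem pv_core_eq (matrix : List (List Int))
    (hocc : ∃ row ∈ pvGrid matrix, pvAny row = true) :
    (pvDropEmpty ((pvDropEmpty (pvGrid matrix)).reverse)).reverse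
      = ((pvGrid matrix).drop (pvTop matrix)).take
          ((pvGrid matrix).length - pvTop matrix - pvBot matrix) := by
  have hle := pv_top_le_bot matrix hocc
  obtain ⟨ha1, -, -⟩ := pv_top_facts matrix hocc
  obtain ⟨hb1, -, -⟩ := pv_bot_facts matrix hocc
  have hm : pvDropEmpty (pvGrid matrix) = (pvGrid matrix).drop (pvTop matrix) := by
    rw [pvDropEmpty_eq_dropWhile, pv_dropWhile_eq_drop]; rfl
  have hrev : ((pvGrid matrix).drop (pvTop matrix)).reverse
      = (pvGrid matrix).reverse.take ((pvGrid matrix).length - pvTop matrix) :=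
    List.reverse_drop
  have htwlen : (((pvGrid matrix).drop (pvTop matrix)).reverse.takeWhile (fun r => !pvAny r)).length
      = pvBot matrix := by
    rw [hrev, ← List.take_takeWhile, List.length_take]
    have : ((pvGrid matrix).reverse.takeWhile (fun r => !pvAny r)).length = pvBot matrix := rfl
    rw [this]
    omega
  rw [hm, pvDropEmpty_eq_dropWhile, pv_dropWhile_eq_drop, htwlen, List.reverse_drop,
    List.reverse_reverse, List.length_reverse, List.length_drop]

-- the rows B trims away are all-zero: filtering occupied rows sees through the trim
theorem pv_filter_core (matrix : List (List Int))
    (hocc : ∃ row ∈ pvGrid matrix, pvAny row = true) :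
    ((((pvGrid matrix).drop (pvTop matrix)).take
        ((pvGrid matrix).length - pvTop matrix - pvBot matrix)).filter (fun row => pvAny row))
      = (pvGrid matrix).filter (fun row => pvAny row) := by
  have hle := pv_top_le_bot matrix hocc
  obtain ⟨ha1, -, -⟩ := pv_top_facts matrix hocc
  obtain ⟨hb1, -, -⟩ := pv_bot_facts matrix hocc
  set g := pvGrid matrix with hg
  set n := g.length with hn
  set a := pvTop matrix with hA
  set b := pvBot matrix with hB
  have htw : g.takeWhile (fun r => !pvAny r) ++ g.drop a = g := by
    rw [show g.drop a = g.dropWhile (fun r => !pvAny r) from (pv_dropWhile_eq_drop g _).symm]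
    exact List.takeWhile_append_dropWhile
  have hfiltw : (g.takeWhile (fun r => !pvAny r)).filter (fun row => pvAny row) = [] := by
    rw [List.filter_eq_nil_iff]
    intro x hx
    have := List.mem_takeWhile_imp hx
    simpa using this
  have hsplit : g.drop a = (g.drop a).take (n - a - b) ++ (g.drop a).drop (n - a - b) :=
    (List.take_append_drop _ _).symm
  have hfilrest : ((g.drop a).drop (n - a - b)).filter (fun row => pvAny row) = [] := by
    rw [List.filter_eq_nil_iff]
    intro x hx
    rw [← List.mem_reverse, List.reverse_drop, List.reverse_drop, List.length_drop,
      show n - a - (n - a - b) = b from by omega] at hx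
    have hbt : List.take b (List.take (g.length - a) g.reverse) = List.take b g.reverse := by
      rw [List.take_take]
      congr 1
      omega
    rw [hbt] at hx
    have htk : g.reverse.take b = g.reverse.takeWhile (fun r => !pvAny r) :=
      (List.prefix_iff_eq_take.mp (List.takeWhile_prefix _)).symm
    rw [htk] at hx
    have := List.mem_takeWhile_imp hx
    simpa using this
  conv_rhs => rw [← htw]
  rw [List.filter_append, hfiltw, List.nil_append]
  conv_rhs => rw [hsplit]
  rw [List.filter_append, hfilrest, List.append_nil]

-- cell/occupancy bridges between the grid and the raw matrix
theorem pv_row_len (matrix : List (List Int))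
    (hrag : ∀ row ∈ matrix, (matrix.headD []).length ≤ row.length)
    (rN : Nat) (h : rN < matrix.length) :
    ((pvGrid matrix).getD rN []).length = pvCols matrix := by
  rw [pv_grid_getD _ _ h, List.length_take]
  have hmem : matrix.getD rN [] ∈ matrix := by
    rw [List.getD_eq_getElem _ _ h]
    exact List.getElem_mem h
  have := hrag _ hmem
  unfold pvCols at *
  omega

theorem pv_cell_of_grid (matrix : List (List Int)) (rN cN : Nat)
    (hr : rN < matrix.length) (hc : cN < pvCols matrix) :
    ((pvGrid matrix).getD rN []).getD cN 0 = (matrix.getD rN []).getD cN 0 := by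
  rw [pv_grid_getD _ _ hr, pv_getD_take _ _ _ _ hc]

theorem pv_getD_mem_grid (matrix : List (List Int)) (rN : Nat) (h : rN < matrix.length) :
    (pvGrid matrix).getD rN [] ∈ pvGrid matrix := by
  rw [List.getD_eq_getElem _ _ (by simpa [pv_grid_length] using h)]
  exact List.getElem_mem _

theorem pv_grid_mem_index (matrix : List (List Int)) (row : List Int)
    (h : row ∈ pvGrid matrix) :
    ∃ rN, rN < matrix.length ∧ (pvGrid matrix).getD rN [] = row := by
  obtain ⟨rN, hr, heq⟩ := List.mem_iff_getElem.mp h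
  rw [pv_grid_length] at hr
  exact ⟨rN, hr, by rw [List.getD_eq_getElem _ _ (by simpa [pv_grid_length] using hr)]; exact heq⟩

theorem pv_occ_iff (matrix : List (List Int))
    (hrag : ∀ row ∈ matrix, (matrix.headD []).length ≤ row.length)
    (rN : Nat) (h : rN < matrix.length) :
    pvAny ((pvGrid matrix).getD rN []) = true ↔
      ∃ cN, cN < pvCols matrix ∧ (matrix.getD rN []).getD cN 0 ≠ 0 := by
  rw [pvAny_iff_exists, pv_row_len matrix hrag rN h]
  constructor
  · rintro ⟨j, hj, hne⟩
    rw [pv_cell_of_grid matrix rN j h hj] at hne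
    exact ⟨j, hj, hne⟩
  · rintro ⟨cN, hc, hne⟩
    exact ⟨cN, hc, by rw [pv_cell_of_grid matrix rN cN h hc]; exact hne⟩

theorem pv_nz_ne_iff (matrix : List (List Int))
    (hrag : ∀ row ∈ matrix, (matrix.headD []).length ≤ row.length) :
    pvNZ matrix (matrix.length : Int) ((pvCols matrix : Nat) : Int) ≠ [] ↔
      ∃ row ∈ pvGrid matrix, pvAny row = true := by
  constructor
  · intro hnz
    obtain ⟨p, hp⟩ := List.exists_mem_of_ne_nil _ hnz
    obtain ⟨rN, cN, hr, hc, -, hcell⟩ := (pv_mem_nz_iff matrix _ _ p).mp hp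
    refine ⟨(pvGrid matrix).getD rN [], pv_getD_mem_grid matrix rN hr, ?_⟩
    exact (pv_occ_iff matrix hrag rN hr).mpr ⟨cN, hc, hcell⟩
  · rintro ⟨row, hrow, hany⟩ hnil
    obtain ⟨rN, hr, heq⟩ := pv_grid_mem_index matrix row hrow
    obtain ⟨cN, hc, hcell⟩ := (pv_occ_iff matrix hrag rN hr).mp (heq ▸ hany)
    have : ((rN : Int), (cN : Int)) ∈ pvNZ matrix (matrix.length : Int) ((pvCols matrix : Nat) : Int) :=
      (pv_mem_nz_iff matrix _ _ _).mpr ⟨rN, cN, hr, hc, rfl, hcell⟩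
    rw [hnil] at this
    cases this

-- A's min/max row indices are B's trim counts
theorem pv_minrow_eq (matrix : List (List Int))
    (hrag : ∀ row ∈ matrix, (matrix.headD []).length ≤ row.length)
    (hocc : ∃ row ∈ pvGrid matrix, pvAny row = true) :
    (PySem.List.min? ((pvNZ matrix (matrix.length : Int) ((pvCols matrix : Nat) : Int)).map Prod.fst)
        (fun y => y)).getD 0 = (pvTop matrix : Int) := by
  obtain ⟨ha1, ha2, ha3⟩ := pv_top_facts matrix hocc
  rw [pv_grid_length] at ha1
  apply pv_min_eq
  · obtain ⟨cN, hc, hcell⟩ := (pv_occ_iff matrix hrag _ ha1).mp ha2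
    exact List.mem_map.mpr ⟨((pvTop matrix : Int), (cN : Int)),
      (pv_mem_nz_iff matrix _ _ _).mpr ⟨pvTop matrix, cN, ha1, hc, rfl, hcell⟩, rfl⟩
  · intro x hx
    obtain ⟨p, hp, rfl⟩ := List.mem_map.mp hx
    obtain ⟨rN, cN, hr, hc, rfl, hcell⟩ := (pv_mem_nz_iff matrix _ _ p).mp hp
    have hocc' : pvAny ((pvGrid matrix).getD rN []) = true :=
      (pv_occ_iff matrix hrag rN hr).mpr ⟨cN, hc, hcell⟩
    have : pvTop matrix ≤ rN := by
      by_contra hlt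
      rw [ha3 rN (by omega)] at hocc'
      cases hocc'
    show (pvTop matrix : Int) ≤ ((rN : Int), (cN : Int)).1
    simp only []
    exact_mod_cast this

theorem pv_maxrow_eq (matrix : List (List Int))
    (hrag : ∀ row ∈ matrix, (matrix.headD []).length ≤ row.length)
    (hocc : ∃ row ∈ pvGrid matrix, pvAny row = true) :
    (PySem.List.max? ((pvNZ matrix (matrix.length : Int) ((pvCols matrix : Nat) : Int)).map Prod.fst)
        (fun y => y)).getD 0 = ((matrix.length - 1 - pvBot matrix : Nat) : Int) := by
  obtain ⟨hb1, hb2, hb3⟩ := pv_bot_facts matrix hocc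
  rw [pv_grid_length] at hb1 hb2 hb3
  apply pv_max_eq
  · obtain ⟨cN, hc, hcell⟩ := (pv_occ_iff matrix hrag _ (by omega)).mp hb2
    exact List.mem_map.mpr ⟨(((matrix.length - 1 - pvBot matrix : Nat) : Int), (cN : Int)),
      (pv_mem_nz_iff matrix _ _ _).mpr
        ⟨matrix.length - 1 - pvBot matrix, cN, by omega, hc, rfl, hcell⟩, rfl⟩
  · intro x hx
    obtain ⟨p, hp, rfl⟩ := List.mem_map.mp hx
    obtain ⟨rN, cN, hr, hc, rfl, hcell⟩ := (pv_mem_nz_iff matrix _ _ p).mp hp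
    have hocc' : pvAny ((pvGrid matrix).getD rN []) = true :=
      (pv_occ_iff matrix hrag rN hr).mpr ⟨cN, hc, hcell⟩
    have : rN ≤ matrix.length - 1 - pvBot matrix := by
      by_contra hlt
      rw [hb3 rN (by omega) hr] at hocc'
      cases hocc'
    show ((rN : Int), (cN : Int)).1 ≤ ((matrix.length - 1 - pvBot matrix : Nat) : Int)
    simp only []
    exact_mod_cast this

-- B's per-occupied-row first/last nonzero extremes are A's column extremes
theorem pv_col_bounds (matrix : List (List Int))
    (hrag : ∀ row ∈ matrix, (matrix.headD []).length ≤ row.length)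
    (hocc : ∃ row ∈ pvGrid matrix, pvAny row = true) :
    ∃ cminN cmaxN : Nat, cmaxN < pvCols matrix ∧
      (PySem.List.min? (((pvGrid matrix).filter (fun row => pvAny row)).map (fun row => pvFirstNZ row))
          (fun y => y)).getD 0 = (cminN : Int) ∧
      (PySem.List.max? (((pvGrid matrix).filter (fun row => pvAny row)).map
            (fun row => (row.length : Int) - pvFirstNZ row.reverse))
          (fun y => y)).getD 0 = ((cmaxN + 1 : Nat) : Int) ∧
      (PySem.List.min? ((pvNZ matrix (matrix.length : Int) ((pvCols matrix : Nat) : Int)).map Prod.snd)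
          (fun y => y)).getD 0 = (cminN : Int) ∧
      (PySem.List.max? ((pvNZ matrix (matrix.length : Int) ((pvCols matrix : Nat) : Int)).map Prod.snd)
          (fun y => y)).getD 0 = (cmaxN : Int) := by
  obtain ⟨row₀, hrow₀g, hrow₀any⟩ := hocc
  have hFne : (pvGrid matrix).filter (fun row => pvAny row) ≠ [] := by
    intro hnil
    have : row₀ ∈ (pvGrid matrix).filter (fun row => pvAny row) :=
      List.mem_filter.mpr ⟨hrow₀g, hrow₀any⟩
    rw [hnil] at this
    cases this
  -- facts about any occupied grid row and its index
  have hrowfact : ∀ row ∈ (pvGrid matrix).filter (fun row => pvAny row),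
      ∃ rN, rN < matrix.length ∧ (pvGrid matrix).getD rN [] = row ∧ pvAny row = true ∧
        row.length = pvCols matrix := by
    intro row hrow
    obtain ⟨hg, hany⟩ := List.mem_filter.mp hrow
    obtain ⟨rN, hr, heq⟩ := pv_grid_mem_index matrix row hg
    exact ⟨rN, hr, heq, hany, by rw [← heq]; exact pv_row_len matrix hrag rN hr⟩
  -- the minimum
  cases hmin : PySem.List.min? (((pvGrid matrix).filter (fun row => pvAny row)).map
      (fun row => pvFirstNZ row)) (fun y => y) with
  | none =>
      rw [PySem.List.min?_eq_none_iff, List.map_eq_nil_iff] at hmin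
      exact absurd hmin hFne
  | some lm =>
  cases hmax : PySem.List.max? (((pvGrid matrix).filter (fun row => pvAny row)).map
      (fun row => (row.length : Int) - pvFirstNZ row.reverse)) (fun y => y) with
  | none =>
      rw [PySem.List.max?_eq_none_iff, List.map_eq_nil_iff] at hmax
      exact absurd hmax hFne
  | some rm =>
  obtain ⟨row₁, hrow₁, hlm⟩ := List.mem_map.mp (PySem.List.min?_mem hmin)
  obtain ⟨row₂, hrow₂, hrm⟩ := List.mem_map.mp (PySem.List.max?_mem hmax)
  obtain ⟨r₁, hr₁, heq₁, hany₁, hlen₁⟩ := hrowfact row₁ hrow₁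
  obtain ⟨r₂, hr₂, heq₂, hany₂, hlen₂⟩ := hrowfact row₂ hrow₂
  have hminle := PySem.List.min?_isMin hmin
  have hmaxge := PySem.List.max?_isMax hmax
  refine ⟨pvFirstNZN row₁, pvLastN row₂, ?_, ?_, ?_, ?_, ?_⟩
  · have := pvLastN_lt row₂ hany₂
    omega
  · rw [Option.getD_some, ← hlm, pvFirstNZ_eq_natCast]
  · rw [Option.getD_some, ← hrm, pvFirstNZ_eq_natCast]
    have := pvFirstNZN_rev_lt row₂ hany₂
    unfold pvLastN
    push_cast
    omega
  · -- min over all nonzero columns = first nonzero of the best row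
    apply pv_min_eq
    · have hfl : pvFirstNZN row₁ < pvCols matrix := by
        have := pvFirstNZN_lt row₁ hany₁
        omega
      have hcell : (matrix.getD r₁ []).getD (pvFirstNZN row₁) 0 ≠ 0 := by
        rw [← pv_cell_of_grid matrix r₁ _ hr₁ hfl, heq₁]
        exact pvFirstNZN_get row₁ hany₁
      exact List.mem_map.mpr ⟨((r₁ : Int), (pvFirstNZN row₁ : Int)),
        (pv_mem_nz_iff matrix _ _ _).mpr ⟨r₁, pvFirstNZN row₁, hr₁, hfl, rfl, hcell⟩, rfl⟩
    · intro x hx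
      obtain ⟨p, hp, rfl⟩ := List.mem_map.mp hx
      obtain ⟨rN, cN, hr, hc, rfl, hcell⟩ := (pv_mem_nz_iff matrix _ _ p).mp hp
      have hocc' : pvAny ((pvGrid matrix).getD rN []) = true :=
        (pv_occ_iff matrix hrag rN hr).mpr ⟨cN, hc, hcell⟩
      have hrowmem : (pvGrid matrix).getD rN [] ∈
          (pvGrid matrix).filter (fun row => pvAny row) :=
        List.mem_filter.mpr ⟨pv_getD_mem_grid matrix rN hr, hocc'⟩
      have hle := hminle _ (List.mem_map.mpr ⟨_, hrowmem, rfl⟩)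
      have hfle : pvFirstNZN ((pvGrid matrix).getD rN []) ≤ cN := by
        by_contra hlt
        have := pvFirstNZN_min ((pvGrid matrix).getD rN []) cN (by omega)
        rw [pv_cell_of_grid matrix rN cN hr hc] at this
        exact hcell this
      rw [← hlm, pvFirstNZ_eq_natCast, pvFirstNZ_eq_natCast] at hle
      have h1 : pvFirstNZN row₁ ≤ pvFirstNZN ((pvGrid matrix).getD rN []) := by
        exact_mod_cast hle
      show (pvFirstNZN row₁ : Int) ≤ ((cN : Nat) : Int)
      exact_mod_cast le_trans h1 hfle
  · -- max over all nonzero columns = last nonzero of the best row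
    apply pv_max_eq
    · have hll : pvLastN row₂ < pvCols matrix := by
        have := pvLastN_lt row₂ hany₂
        omega
      have hcell : (matrix.getD r₂ []).getD (pvLastN row₂) 0 ≠ 0 := by
        rw [← pv_cell_of_grid matrix r₂ _ hr₂ hll, heq₂]
        exact pvLastN_get row₂ hany₂
      exact List.mem_map.mpr ⟨((r₂ : Int), (pvLastN row₂ : Int)),
        (pv_mem_nz_iff matrix _ _ _).mpr ⟨r₂, pvLastN row₂, hr₂, hll, rfl, hcell⟩, rfl⟩
    · intro x hx
      obtain ⟨p, hp, rfl⟩ := List.mem_map.mp hx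
      obtain ⟨rN, cN, hr, hc, rfl, hcell⟩ := (pv_mem_nz_iff matrix _ _ p).mp hp
      have hocc' : pvAny ((pvGrid matrix).getD rN []) = true :=
        (pv_occ_iff matrix hrag rN hr).mpr ⟨cN, hc, hcell⟩
      have hrowmem : (pvGrid matrix).getD rN [] ∈
          (pvGrid matrix).filter (fun row => pvAny row) :=
        List.mem_filter.mpr ⟨pv_getD_mem_grid matrix rN hr, hocc'⟩
      have hge := hmaxge _ (List.mem_map.mpr ⟨_, hrowmem, rfl⟩)
      have hcle : cN ≤ pvLastN ((pvGrid matrix).getD rN []) := by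
        by_contra hlt
        have := pvLastN_max ((pvGrid matrix).getD rN []) hocc' cN (by omega)
        rw [pv_cell_of_grid matrix rN cN hr hc] at this
        exact hcell this
      -- the max-list value of this row is lastN + 1
      have hrevlt := pvFirstNZN_rev_lt ((pvGrid matrix).getD rN []) hocc'
      have hrlen := pv_row_len matrix hrag rN hr
      have hval : (((pvGrid matrix).getD rN []).length : Int)
          - pvFirstNZ ((pvGrid matrix).getD rN []).reverse
          = ((pvLastN ((pvGrid matrix).getD rN []) + 1 : Nat) : Int) := by
        rw [pvFirstNZ_eq_natCast]
        unfold pvLastN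
        push_cast
        omega
      rw [hval] at hge
      rw [← hrm, pvFirstNZ_eq_natCast] at hge
      have hrevlt₂ := pvFirstNZN_rev_lt row₂ hany₂
      have hfinal : cN ≤ pvLastN row₂ := by
        have h1 : pvLastN ((pvGrid matrix).getD rN []) + 1 ≤ pvLastN row₂ + 1 := by
          unfold pvLastN at hge ⊢
          push_cast at hge
          omega
        omega
      show ((cN : Nat) : Int) ≤ (pvLastN row₂ : Int)
      exact_mod_cast hfinal

-- slicing a cols-truncated row inside the box = slicing the raw row
theorem pv_slice_row (row : List Int) (cminN cmaxN colsN : Nat) (hmax : cmaxN < colsN) :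
    PySem.List.slice (row.take colsN) (some (cminN : Int)) (some ((cmaxN + 1 : Nat) : Int))
      = PySem.List.slice row (some (cminN : Int)) (some ((cmaxN : Int) + 1)) := by
  rw [show ((cmaxN : Int) + 1) = ((cmaxN + 1 : Nat) : Int) from by push_cast; ring]
  rw [PySem.List.slice_natCast, PySem.List.slice_natCast, List.drop_take, List.take_take]
  congr 1
  omega

-- the two output builders produce the same trimmed matrix
theorem pv_final (matrix : List (List Int)) (aN bN cminN cmaxN : Nat)
    (hb : bN < matrix.length) (hab : aN ≤ matrix.length - 1 - bN) (hcmax : cmaxN < pvCols matrix) :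
    (PySem.List.pyRange (aN : Int) (((matrix.length - 1 - bN : Nat) : Int) + 1) 1).map
        (fun r => PySem.List.slice (PySem.List.pyGetD matrix r []) (some (cminN : Int))
          (some ((cmaxN : Int) + 1)))
      = (((pvGrid matrix).drop aN).take (matrix.length - aN - bN)).map
          (fun row => PySem.List.slice row (some (cminN : Int)) (some ((cmaxN + 1 : Nat) : Int))) := by
  rw [PySem.List.pyRange_one, List.map_map]
  apply List.ext_getElem
  · simp [pv_grid_length]
    omega
  · intro i h1 h2
    simp only [List.getElem_map, List.getElem_take, List.getElem_drop, Function.comp_apply,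
      List.getElem_range]
    have hlen : ((((matrix.length - 1 - bN : Nat) : Int) + 1 - (aN : Int)).toNat) =
        matrix.length - bN - aN := by omega
    have hi : i < matrix.length - bN - aN := by
      simpa [hlen] using h1
    have hidx : ((aN : Int) + (i : Int)) = ((aN + i : Nat) : Int) := by push_cast; ring
    rw [hidx, PySem.List.pyGetD_natCast]
    have hgrid_el : (pvGrid matrix)[aN + i]'(by simp [pv_grid_length]; omega)
        = (matrix.getD (aN + i) []).take (pvCols matrix) := by
      simp only [pvGrid, List.getElem_map]
      rw [List.getD_eq_getElem _ _ (by omega)]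
    rw [hgrid_el, pv_slice_row _ _ _ _ hcmax]

-- ===== VERDICT (by name: the statement is the Claim_ definition above) =====
theorem validate_and_trim_map_spec : Claim_equal_validate_and_trim_map := by
  intro matrix hdom hpre
  unfold Spec_validate_and_trim_map
  obtain ⟨hrag, hs, hf⟩ := hpre
  have hne : matrix ≠ [] := by
    rintro rfl
    simp at hs
  have hB2 : ((PySem.List.count (matrix.flatMap fun row => row) 2 : Nat) : Int) = 1 := by
    rw [PySem.List.count_eq, List.flatMap_id', pv_count_flatten_int]
    simpa [PySem.List.count_eq] using hs
  have hB3 : ((PySem.List.count (matrix.flatMap fun row => row) 3 : Nat) : Int) = 1 := by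
    rw [PySem.List.count_eq, List.flatMap_id', pv_count_flatten_int]
    simpa [PySem.List.count_eq] using hf
  simp only [validate_and_trim_map, validate_and_trim_map_alt]
  rw [PySem.List.foldl_add, PySem.List.foldl_add, hs, hf, hB2, hB3]
  simp only [show (((0 : Int) + 1 ≠ 1)) ↔ False from by norm_num,
    show (((1 : Int) ≠ 1)) ↔ False from by norm_num, if_false]
  have hcolsA : (if (matrix.length : Int) > 0 then ((PySem.List.pyGetD matrix 0 []).length : Int) else 0)
      = ((pvCols matrix : Nat) : Int) := by
    rw [if_pos (by exact_mod_cast List.length_pos_iff.mpr hne), PySem.List.pyGetD_zero,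
      pv_getD_zero_eq_headD]
    rfl
  have hcolsB : (if matrix ≠ [] then ((PySem.List.pyGetD matrix 0 []).length : Int) else 0)
      = ((pvCols matrix : Nat) : Int) := by
    rw [if_pos hne, PySem.List.pyGetD_zero, pv_getD_zero_eq_headD]
    rfl
  rw [hcolsA, hcolsB]
  have hgrid : matrix.map (fun row => PySem.List.slice row none (some ((pvCols matrix : Nat) : Int)))
      = pvGrid matrix := by
    unfold pvGrid
    simp only [PySem.List.slice_to_natCast]
  rw [hgrid, pv_state matrix (matrix.length : Int) ((pvCols matrix : Nat) : Int)]
  by_cases hnz : pvNZ matrix (matrix.length : Int) ((pvCols matrix : Nat) : Int) = []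
  · -- no nonzero cell inside the cols-wide rectangle: both return []
    rw [if_pos hnz]
    have hnone : ∀ row ∈ pvGrid matrix, pvAny row = false := by
      intro row hrow
      by_contra h
      exact ((pv_nz_ne_iff matrix hrag).mpr ⟨row, hrow, by simpa using h⟩) hnz
    have hdnil : pvDropEmpty (pvGrid matrix) = [] := by
      rw [pvDropEmpty_eq_dropWhile, List.dropWhile_eq_nil_iff]
      intro x hx
      simp [hnone x hx]
    rw [hdnil]
    simp only [List.reverse_nil]
    rw [show pvDropEmpty ([] : List (List Int)) = [] from rfl]
    simp only [List.reverse_nil, if_true]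
    rw [show (-1 : Int) + 1 = 0 from by norm_num,
      pv_pyRange_nil (matrix.length : Int) 0 (by positivity)]
    rfl
  · -- occupied case: rewrite both sides to the common trimmed box
    have hocc := (pv_nz_ne_iff matrix hrag).mp hnz
    rw [if_neg hnz, pv_core_eq matrix hocc]
    have hle := pv_top_le_bot matrix hocc
    obtain ⟨ha1, -, -⟩ := pv_top_facts matrix hocc
    obtain ⟨hb1, -, -⟩ := pv_bot_facts matrix hocc
    rw [pv_grid_length] at ha1 hb1 hle
    have hcne : ((pvGrid matrix).drop (pvTop matrix)).take
        ((pvGrid matrix).length - pvTop matrix - pvBot matrix) ≠ [] := by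
      intro hnil
      have := congrArg List.length hnil
      simp [List.length_take, List.length_drop, pv_grid_length] at this
      omega
    rw [if_neg hcne, pv_filter_core matrix hocc]
    obtain ⟨cminN, cmaxN, hcmax, hleft, hright, hminc, hmaxc⟩ := pv_col_bounds matrix hrag hocc
    rw [hleft, hright, hminc, hmaxc, pv_minrow_eq matrix hrag hocc, pv_maxrow_eq matrix hrag hocc,
      pv_grid_length]
    exact pv_final matrix (pvTop matrix) (pvBot matrix) cminN cmaxN hb1 hle hcmax
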